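-- pv_equiv track=rewrite | github.com/farnunglab/benchaid | scripts/orf_verifier_cli.py | is_conservative_change
-- ===== SOURCE A (Python) =====
-- def is_conservative_change(expected: str, observed: str) -> bool:
--     groups = [
--         set("AVLIM"),
--         set("FYW"),
--         set("KRH"),
--         set("DE"),
--         set("STNQ"),
--         set("GP"),
--         set("C"),
--     ]
--     for group in groups:
--         if expected in group and observed in group:
--             return True
--     return False
-- ===== SOURCE B (Python) =====
-- # B: one dict lookup table (char -> group id) built once, instead of scanning the seven sets per call.
-- _GROUPS = ["AVLIM", "FYW", "KRH", "DE", "STNQ", "GP", "C"]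
-- _GROUP_ID = {aa: i for i, g in enumerate(_GROUPS) for aa in g}
--
--
-- def is_conservative_change(expected: str, observed: str) -> bool:
--     gid = _GROUP_ID.get(expected)
--     return gid is not None and _GROUP_ID.get(observed) == gid
-- ===== Notes on version B (the rewrite author's own statement) =====
-- stated objective: idiomatic
-- what changed: Replaces the per-call scan over seven sets with a single char-to-group-id dict built once; the answer is two lookups (expected must be in the table and map to the same id as observed).
import Mathlib
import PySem

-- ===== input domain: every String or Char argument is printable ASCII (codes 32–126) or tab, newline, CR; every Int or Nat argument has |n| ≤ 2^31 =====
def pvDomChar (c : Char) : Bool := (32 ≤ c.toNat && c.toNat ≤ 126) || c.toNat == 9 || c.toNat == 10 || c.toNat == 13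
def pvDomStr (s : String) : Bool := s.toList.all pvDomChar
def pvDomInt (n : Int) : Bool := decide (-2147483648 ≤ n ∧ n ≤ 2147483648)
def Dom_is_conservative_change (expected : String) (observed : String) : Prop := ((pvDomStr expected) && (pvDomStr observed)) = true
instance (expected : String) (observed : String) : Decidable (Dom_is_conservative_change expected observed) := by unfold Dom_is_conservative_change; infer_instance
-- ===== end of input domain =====

-- B replaces A's per-call scan over seven sets with two lookups in a char->group-id dict built once (idiomatic).

-- ===== PORT A =====
-- groups = [set("AVLIM"), set("FYW"), ...]: literal sets of 1-char strings, in order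
def pvGroupsA : List (PySem.Set String) :=
  [PySem.Set.ofList ["A","V","L","I","M"],
   PySem.Set.ofList ["F","Y","W"],
   PySem.Set.ofList ["K","R","H"],
   PySem.Set.ofList ["D","E"],
   PySem.Set.ofList ["S","T","N","Q"],
   PySem.Set.ofList ["G","P"],
   PySem.Set.ofList ["C"]]

-- the for-loop with early 'return True' over the groups, 'return False' at the end, is List.any
def is_conservative_change (expected : String) (observed : String) : Bool :=
  pvGroupsA.any (fun group => PySem.Set.contains group expected && PySem.Set.contains group observed)

-- ===== PORT B =====
def pvGroupsB : List String := ["AVLIM", "FYW", "KRH", "DE", "STNQ", "GP", "C"]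

-- _GROUP_ID = {aa: i for i, g in enumerate(_GROUPS) for aa in g}
def pvGroupId : PySem.Dict String Int :=
  PySem.Dict.ofList ((PySem.List.enumerate pvGroupsB).flatMap
    (fun p => p.2.toList.map (fun c => (String.ofList [c], p.1))))

-- gid = _GROUP_ID.get(expected); return gid is not None and _GROUP_ID.get(observed) == gid
def is_conservative_change_alt (expected : String) (observed : String) : Bool :=
  match pvGroupId.get? expected with
  | some gid => pvGroupId.get? observed == some gid
  | none => false

-- ===== PRECONDITION & SPEC =====
def Spec_is_conservative_change (expected : String) (observed : String) (out : Bool) : Prop := out = is_conservative_change_alt expected observed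
instance (expected : String) (observed : String) (out : Bool) : Decidable (Spec_is_conservative_change expected observed out) := by unfold Spec_is_conservative_change; infer_instance

-- ===== CLAIM (what is proved, stated in full; the proofs are below) =====
def Claim_equal_is_conservative_change : Prop := ∀ (expected : String) (observed : String), Dom_is_conservative_change expected observed → Spec_is_conservative_change expected observed (is_conservative_change expected observed)

-- ===== LEMMAS AND PROOFS =====

-- B's dict comprehension, evaluated once: the literal char->group-id table
theorem pvGroupId_eq : pvGroupId = PySem.Dict.mk
    [("A",0),("V",0),("L",0),("I",0),("M",0),
     ("F",1),("Y",1),("W",1),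
     ("K",2),("R",2),("H",2),
     ("D",3),("E",3),
     ("S",4),("T",4),("N",4),("Q",4),
     ("G",5),("P",5),
     ("C",6)] := by rfl

theorem pvNodup : pvGroupId.keys.Nodup := by rw [pvGroupId_eq]; decide

-- membership in group j ↔ the table maps to id j (one lemma per group)
theorem pvL0 (s : String) : s ∈ (["A","V","L","I","M"] : List String) ↔ pvGroupId.get? s = some 0 := by
  rw [PySem.Dict.get?_eq_some_iff_mem_items pvGroupId s 0 pvNodup, pvGroupId_eq]
  simp [Prod.ext_iff]
theorem pvL1 (s : String) : s ∈ (["F","Y","W"] : List String) ↔ pvGroupId.get? s = some 1 := by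
  rw [PySem.Dict.get?_eq_some_iff_mem_items pvGroupId s 1 pvNodup, pvGroupId_eq]
  simp [Prod.ext_iff]
theorem pvL2 (s : String) : s ∈ (["K","R","H"] : List String) ↔ pvGroupId.get? s = some 2 := by
  rw [PySem.Dict.get?_eq_some_iff_mem_items pvGroupId s 2 pvNodup, pvGroupId_eq]
  simp [Prod.ext_iff]
theorem pvL3 (s : String) : s ∈ (["D","E"] : List String) ↔ pvGroupId.get? s = some 3 := by
  rw [PySem.Dict.get?_eq_some_iff_mem_items pvGroupId s 3 pvNodup, pvGroupId_eq]
  simp [Prod.ext_iff]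
theorem pvL4 (s : String) : s ∈ (["S","T","N","Q"] : List String) ↔ pvGroupId.get? s = some 4 := by
  rw [PySem.Dict.get?_eq_some_iff_mem_items pvGroupId s 4 pvNodup, pvGroupId_eq]
  simp [Prod.ext_iff]
theorem pvL5 (s : String) : s ∈ (["G","P"] : List String) ↔ pvGroupId.get? s = some 5 := by
  rw [PySem.Dict.get?_eq_some_iff_mem_items pvGroupId s 5 pvNodup, pvGroupId_eq]
  simp [Prod.ext_iff]
theorem pvL6 (s : String) : s ∈ (["C"] : List String) ↔ pvGroupId.get? s = some 6 := by
  rw [PySem.Dict.get?_eq_some_iff_mem_items pvGroupId s 6 pvNodup, pvGroupId_eq]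
  simp [Prod.ext_iff]

-- every id the table produces is one of 0..6
theorem pvVal (s : String) (v : Int) (h : pvGroupId.get? s = some v) :
    v = 0 ∨ v = 1 ∨ v = 2 ∨ v = 3 ∨ v = 4 ∨ v = 5 ∨ v = 6 := by
  have hm := PySem.Dict.mem_items_of_get?_eq_some pvGroupId h
  rw [pvGroupId_eq] at hm
  simp [Prod.ext_iff] at hm
  rcases hm with ⟨_,h⟩|⟨_,h⟩|⟨_,h⟩|⟨_,h⟩|⟨_,h⟩|⟨_,h⟩|⟨_,h⟩|⟨_,h⟩|⟨_,h⟩|⟨_,h⟩|⟨_,h⟩|⟨_,h⟩|⟨_,h⟩|⟨_,h⟩|⟨_,h⟩|⟨_,h⟩|⟨_,h⟩|⟨_,h⟩|⟨_,h⟩|⟨_,h⟩ <;> omega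

-- A answers true iff both strings map to the same group id in B's table
theorem pvA_iff (e o : String) : is_conservative_change e o = true ↔
    ∃ v, pvGroupId.get? e = some v ∧ pvGroupId.get? o = some v := by
  unfold is_conservative_change pvGroupsA
  simp only [List.any_cons, List.any_nil, Bool.or_eq_true, Bool.and_eq_true, Bool.or_false,
    PySem.Set.contains_iff, PySem.Set.mem_ofList, pvL0, pvL1, pvL2, pvL3, pvL4, pvL5, pvL6]
  constructor
  · rintro (⟨h1,h2⟩|⟨h1,h2⟩|⟨h1,h2⟩|⟨h1,h2⟩|⟨h1,h2⟩|⟨h1,h2⟩|⟨h1,h2⟩) <;> exact ⟨_, h1, h2⟩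
  · rintro ⟨v, h1, h2⟩
    rcases pvVal e v h1 with hv|hv|hv|hv|hv|hv|hv <;> subst hv
    · exact Or.inl ⟨h1, h2⟩
    · exact Or.inr (Or.inl ⟨h1, h2⟩)
    · exact Or.inr (Or.inr (Or.inl ⟨h1, h2⟩))
    · exact Or.inr (Or.inr (Or.inr (Or.inl ⟨h1, h2⟩)))
    · exact Or.inr (Or.inr (Or.inr (Or.inr (Or.inl ⟨h1, h2⟩))))
    · exact Or.inr (Or.inr (Or.inr (Or.inr (Or.inr (Or.inl ⟨h1, h2⟩)))))
    · exact Or.inr (Or.inr (Or.inr (Or.inr (Or.inr (Or.inr ⟨h1, h2⟩)))))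

-- B answers true under exactly the same condition
theorem pvAlt_iff (e o : String) : is_conservative_change_alt e o = true ↔
    ∃ v, pvGroupId.get? e = some v ∧ pvGroupId.get? o = some v := by
  unfold is_conservative_change_alt
  cases h : pvGroupId.get? e with
  | none => simp
  | some gid =>
    simp only [beq_iff_eq]
    constructor
    · intro h2; exact ⟨gid, rfl, h2⟩
    · rintro ⟨v, hv, h2⟩
      injection hv with hv; subst hv; exact h2

theorem pv_main (e o : String) : is_conservative_change e o = is_conservative_change_alt e o :=
  Bool.coe_iff_coe.mp ((pvA_iff e o).trans (pvAlt_iff e o).symm)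

-- ===== VERDICT (by name: the statement is the Claim_ definition above) =====
theorem is_conservative_change_spec : Claim_equal_is_conservative_change := by
  intro expected observed _
  unfold Spec_is_conservative_change
  exact pv_main expected observed
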